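-- pv_equiv track=rewrite | github.com/AV3NII/ProtoCore | researchScripts/experiment1.py | create_feature_mapping_and_groups
-- ===== SOURCE A (Python) =====
-- def create_feature_mapping_and_groups(feature_names, original_cat_cols, numerical_cols):
--     """Creates feature mapping and groups for SHAP plots."""
--     feature_mapping = {}
--     feature_groups = {}
--     for i, col in enumerate(feature_names):
--         if col in numerical_cols:
--             feature_mapping[i] = col
--             feature_groups[col] = [i]
--     for cat_col in original_cat_cols:
--         cat_indices = []
--         for i, col in enumerate(feature_names):
--             if col.startswith(f"{cat_col}_"):
--                 category = col.split('_', 1)[1]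
--                 feature_mapping[i] = f"{cat_col}={category}"
--                 cat_indices.append(i)
--         feature_groups[cat_col] = cat_indices
--     return feature_mapping, feature_groups
-- ===== SOURCE B (Python) =====
-- def create_feature_mapping_and_groups(feature_names, original_cat_cols, numerical_cols):
--     """Creates feature mapping and groups for SHAP plots.
--
--     Instead of scanning all features once per categorical column, this version
--     inverts the prefix matching: one pass over the features checks, at each
--     underscore position k, whether the prefix col[:k] is a categorical column
--     (hash lookup), collecting every match in a single sweep.
--     """
--     num_set = set(numerical_cols)
--     matches = {c: [] for c in original_cat_cols}
--     feature_mapping = {}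
--     feature_groups = {}
--     for i, col in enumerate(feature_names):
--         if col in num_set:
--             feature_mapping[i] = col
--             feature_groups[col] = [i]
--     for i, col in enumerate(feature_names):
--         for k in range(len(col)):
--             if col[k] == '_' and col[:k] in matches:
--                 matches[col[:k]].append((i, col))
--     for cat_col in original_cat_cols:
--         pairs = matches[cat_col]
--         for i, col in pairs:
--             feature_mapping[i] = f"{cat_col}={col.split('_', 1)[1]}"
--         feature_groups[cat_col] = [i for i, _ in pairs]
--     return feature_mapping, feature_groups
-- ===== Notes on version B (the rewrite author's own statement) =====
-- stated objective: faster
-- what changed: A rescans the whole feature list once per categorical column (prefix test each time); B makes a single sweep over the features, hash-looking-up each underscore-delimited prefix col[:k] in a dict keyed by the categorical columns, then replays the collected matches per column.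
import Mathlib
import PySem

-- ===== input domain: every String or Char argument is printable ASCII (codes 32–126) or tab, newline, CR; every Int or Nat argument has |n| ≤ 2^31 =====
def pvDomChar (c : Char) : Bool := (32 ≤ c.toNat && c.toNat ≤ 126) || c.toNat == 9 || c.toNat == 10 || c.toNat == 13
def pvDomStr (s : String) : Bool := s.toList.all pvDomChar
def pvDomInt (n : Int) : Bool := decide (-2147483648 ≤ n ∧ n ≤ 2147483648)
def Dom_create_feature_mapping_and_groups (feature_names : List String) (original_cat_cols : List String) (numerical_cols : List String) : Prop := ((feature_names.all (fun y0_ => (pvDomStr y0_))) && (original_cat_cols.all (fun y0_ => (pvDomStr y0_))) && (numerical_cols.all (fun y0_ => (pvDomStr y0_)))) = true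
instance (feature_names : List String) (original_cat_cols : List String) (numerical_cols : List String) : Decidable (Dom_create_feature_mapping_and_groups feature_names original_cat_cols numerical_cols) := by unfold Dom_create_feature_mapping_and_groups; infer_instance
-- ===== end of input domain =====

-- B replaces A's per-categorical-column scan of all features by a single sweep over the
-- features that hash-looks-up each underscore-delimited prefix in the categorical-column set
-- (objective: faster). Both programs are total; return value only, no mutation.

-- ===== PORT A =====
-- f"{cat_col}={col.split('_', 1)[1]}" — this exact expression occurs in both Pythons.
-- The two .getD defaults are unreachable at every call site: col contains '_' there.
def pvCatLabel (cat_col col : String) : String :=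
  cat_col ++ "=" ++ ((PySem.List.pyGet? ((PySem.Str.splitMax? col "_" 1).getD []) 1).getD "")

-- first loop of A: `if col in numerical_cols: feature_mapping[i] = col; feature_groups[col] = [i]`
def pvNumStepA (numerical_cols : List String)
    (st : PySem.Dict Int String × PySem.Dict String (List Int)) (p : Int × String) :
    PySem.Dict Int String × PySem.Dict String (List Int) :=
  if p.2 ∈ numerical_cols then (st.1.insert p.1 p.2, st.2.insert p.2 [p.1]) else st

-- body of A's `for cat_col in original_cat_cols` loop
def pvCatStepA (feature_names : List String)
    (st : PySem.Dict Int String × PySem.Dict String (List Int)) (cat_col : String) :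
    PySem.Dict Int String × PySem.Dict String (List Int) :=
  let inner := (PySem.List.enumerate feature_names).foldl
    (fun (q : PySem.Dict Int String × List Int) p =>
      if PySem.Str.startswith p.2 (cat_col ++ "_") then
        (q.1.insert p.1 (pvCatLabel cat_col p.2), q.2 ++ [p.1])
      else q)
    (st.1, ([] : List Int))
  (inner.1, st.2.insert cat_col inner.2)

def create_feature_mapping_and_groups (feature_names : List String) (original_cat_cols : List String) (numerical_cols : List String) : (List (Int × String)) × (List (String × List Int)) :=
  let st0 := (PySem.List.enumerate feature_names).foldl (pvNumStepA numerical_cols)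
    (PySem.Dict.empty, PySem.Dict.empty)
  let st := original_cat_cols.foldl (pvCatStepA feature_names) st0
  (st.1.items, st.2.items)

-- ===== PORT B =====
-- first loop of B (same statements as A's, membership tested in the set num_set)
def pvNumStepB (num_set : PySem.Set String)
    (st : PySem.Dict Int String × PySem.Dict String (List Int)) (p : Int × String) :
    PySem.Dict Int String × PySem.Dict String (List Int) :=
  if PySem.Set.contains num_set p.2 then (st.1.insert p.1 p.2, st.2.insert p.2 [p.1]) else st

-- `if col[k] == '_' and col[:k] in matches: matches[col[:k]].append((i, col))`
-- (the key is present when modify runs, so modify's insert-if-absent case is unreachable)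
def pvKStep (p : Int × String) (m : PySem.Dict String (List (Int × String))) (k : Int) :
    PySem.Dict String (List (Int × String)) :=
  if (PySem.Str.pyGet? p.2 k == some '_') && m.contains (PySem.Str.slice p.2 none (some k)) then
    m.modify (PySem.Str.slice p.2 none (some k)) [] (· ++ [p])
  else m

-- `for k in range(len(col)): …`
def pvFeatStep (m : PySem.Dict String (List (Int × String))) (p : Int × String) :
    PySem.Dict String (List (Int × String)) :=
  (PySem.List.pyRange 0 (PySem.Str.len p.2) 1).foldl (pvKStep p) m

-- body of B's final `for cat_col in original_cat_cols` loop
-- (`matches[cat_col]` cannot raise: the key is in matches by construction)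
def pvCatStepB (mtchs : PySem.Dict String (List (Int × String)))
    (st : PySem.Dict Int String × PySem.Dict String (List Int)) (cat_col : String) :
    PySem.Dict Int String × PySem.Dict String (List Int) :=
  let pairs := mtchs.getD cat_col []
  (pairs.foldl (fun m (p : Int × String) => m.insert p.1 (pvCatLabel cat_col p.2)) st.1,
   st.2.insert cat_col (pairs.map (·.1)))

def create_feature_mapping_and_groups_alt (feature_names : List String) (original_cat_cols : List String) (numerical_cols : List String) : (List (Int × String)) × (List (String × List Int)) :=
  let num_set := PySem.Set.ofList numerical_cols
  let matches0 := original_cat_cols.foldl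
    (fun (d : PySem.Dict String (List (Int × String))) c => d.insert c []) PySem.Dict.empty
  let st0 := (PySem.List.enumerate feature_names).foldl (pvNumStepB num_set)
    (PySem.Dict.empty, PySem.Dict.empty)
  let mtchs := (PySem.List.enumerate feature_names).foldl pvFeatStep matches0
  let st := original_cat_cols.foldl (pvCatStepB mtchs) st0
  (st.1.items, st.2.items)

-- ===== PRECONDITION & SPEC =====
def Spec_create_feature_mapping_and_groups (feature_names : List String) (original_cat_cols : List String) (numerical_cols : List String) (out : (List (Int × String)) × (List (String × List Int))) : Prop := out = create_feature_mapping_and_groups_alt feature_names original_cat_cols numerical_cols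
instance (feature_names : List String) (original_cat_cols : List String) (numerical_cols : List String) (out : (List (Int × String)) × (List (String × List Int))) : Decidable (Spec_create_feature_mapping_and_groups feature_names original_cat_cols numerical_cols out) := by unfold Spec_create_feature_mapping_and_groups; infer_instance

-- ===== CLAIM (what is proved, stated in full; the proofs are below) =====
def Claim_equal_create_feature_mapping_and_groups : Prop := ∀ (feature_names : List String) (original_cat_cols : List String) (numerical_cols : List String), Dom_create_feature_mapping_and_groups feature_names original_cat_cols numerical_cols → Spec_create_feature_mapping_and_groups feature_names original_cat_cols numerical_cols (create_feature_mapping_and_groups feature_names original_cat_cols numerical_cols)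

-- ===== LEMMAS AND PROOFS =====

-- `col.startswith(cat_col + "_")` as a predicate on enumerate-pairs
def pvCond (c : String) (p : Int × String) : Bool := PySem.Str.startswith p.2 (c ++ "_")

-- the two numeric-pass steps coincide
theorem pvNumStep_eq (ncs : List String) (st : PySem.Dict Int String × PySem.Dict String (List Int))
    (p : Int × String) : pvNumStepB (PySem.Set.ofList ncs) st p = pvNumStepA ncs st p := by
  unfold pvNumStepA pvNumStepB
  by_cases h : p.2 ∈ ncs <;> simp [pysem, h]

-- A's inner feature scan for one cat_col, split into its two components
theorem pvPairfold (c : String) (l : List (Int × String)) :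
    ∀ (m : PySem.Dict Int String) (acc : List Int),
    l.foldl (fun (q : PySem.Dict Int String × List Int) p =>
        if PySem.Str.startswith p.2 (c ++ "_") then
          (q.1.insert p.1 (pvCatLabel c p.2), q.2 ++ [p.1])
        else q) (m, acc)
    = ((l.filter (pvCond c)).foldl (fun m (p : Int × String) => m.insert p.1 (pvCatLabel c p.2)) m,
       acc ++ (l.filter (pvCond c)).map (·.1)) := by
  induction l with
  | nil => intro m acc; simp
  | cons p l ih =>
    intro m acc
    rw [List.foldl_cons, List.filter_cons]
    by_cases h : PySem.Str.startswith p.2 (c ++ "_") = true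
    · rw [if_pos h, ih, if_pos (show pvCond c p = true from h), List.map_cons, List.foldl_cons]
      simp [List.append_assoc]
    · rw [if_neg h, ih, if_neg (show ¬ pvCond c p = true from h)]

-- the matching positions k: col[k] == '_' and col[:k] == c iff k = len(c) and col startswith c+"_"
theorem pvPrefMatch (col c : String) (k : Nat) (hk : k < col.toList.length) :
    (PySem.Str.pyGet? col (k : Int) = some '_' ∧ PySem.Str.slice col none (some (k : Int)) = c)
    ↔ (k = c.toList.length ∧ PySem.Str.startswith col (c ++ "_") = true) := by
  rw [PySem.Str.pyGet?_natCast]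
  have hsl : PySem.Str.slice col none (some (k : Int)) = c ↔ col.toList.take k = c.toList := by
    rw [← String.toList_inj, PySem.Str.toList_slice, PySem.Chars.slice_eq_listSlice,
      PySem.List.slice_to_natCast]
  rw [hsl, PySem.Str.startswith_eq, PySem.Chars.startswith_iff, String.toList_append]
  have hu : ("_" : String).toList = ['_'] := rfl
  rw [hu, List.prefix_iff_eq_take, List.length_append]
  constructor
  · rintro ⟨h1, h2⟩
    have hlen : k = c.toList.length := by
      have h3 := congrArg List.length h2
      rw [List.length_take] at h3
      omega
    
    refine ⟨hlen, ?_⟩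
    rw [← hlen]
    simp only [List.length_singleton]
    rw [List.take_add_one, h2, h1]
    rfl
  · rintro ⟨hlen, h2⟩
    simp only [List.length_singleton] at h2
    rw [← hlen, List.take_add_one] at h2
    have hlt : (List.take k col.toList).length = k := by
      rw [List.length_take]; omega
    obtain ⟨ha, hb⟩ := List.append_inj h2.symm (by omega)
    refine ⟨?_, ha⟩
    cases h : col.toList[k]? with
    | none => rw [h] at hb; simp at hb
    | some ch => rw [h] at hb; simp at hb; rw [hb]

-- k-loop: key set unchanged
theorem pvContainsKfold (p : Int × String) (ks : List Int) :
    ∀ (m : PySem.Dict String (List (Int × String))) (c' : String),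
    ((ks.foldl (pvKStep p) m).contains c') = m.contains c' := by
  induction ks with
  | nil => intro m c'; simp
  | cons k ks ih =>
    intro m c'
    simp only [List.foldl_cons, pvKStep]
    by_cases h : ((PySem.Str.pyGet? p.2 k == some '_')
        && m.contains (PySem.Str.slice p.2 none (some k))) = true
    · rw [if_pos h, ih, PySem.Dict.contains_modify]
      obtain ⟨-, hc⟩ : _ ∧ _ := by simpa using h
      by_cases he : c' = PySem.Str.slice p.2 none (some k)
      · subst he; simp [hc]
      · simp [he]
    · rw [if_neg h, ih]

-- k-loop: effect on one entry
theorem pvGetDKfold (p : Int × String) (ks : List Int) :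
    ∀ (m : PySem.Dict String (List (Int × String))) (c : String),
    (ks.foldl (pvKStep p) m).getD c []
    = m.getD c [] ++ (ks.filter (fun k =>
        (PySem.Str.pyGet? p.2 k == some '_')
        && m.contains (PySem.Str.slice p.2 none (some k))
        && (PySem.Str.slice p.2 none (some k) == c))).map (fun _ => p) := by
  induction ks with
  | nil => intro m c; simp
  | cons k ks ih =>
    intro m c
    simp only [List.foldl_cons, List.filter_cons, pvKStep]
    by_cases h : ((PySem.Str.pyGet? p.2 k == some '_')
        && m.contains (PySem.Str.slice p.2 none (some k))) = true
    · obtain ⟨hg, hc⟩ : _ ∧ _ := by simpa using h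
      rw [if_pos h, ih]
      have hcont : ∀ x, (m.modify (PySem.Str.slice p.2 none (some k)) [] (· ++ [p])).contains x
          = m.contains x := by
        intro x
        rw [PySem.Dict.contains_modify]
        by_cases he : x = PySem.Str.slice p.2 none (some k)
        · subst he; simp [hc]
        · simp [he]
      simp only [hcont]
      rw [PySem.Dict.getD_modify]
      by_cases he : c = PySem.Str.slice p.2 none (some k)
      · rw [if_pos he]
        have hbeq : (PySem.Str.slice p.2 none (some k) == c) = true := by
          simp [he]
        rw [if_pos (by simp [hg, hc, hbeq])]
        rw [he]
        simp [List.append_assoc]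
      · rw [if_neg he]
        have hbeq : (PySem.Str.slice p.2 none (some k) == c) = false := by
          simp; intro hx; exact he hx.symm
        rw [if_neg (by simp [hbeq])]
    · rw [if_neg h, ih]
      have hno : ¬ (((PySem.Str.pyGet? p.2 k == some '_')
          && m.contains (PySem.Str.slice p.2 none (some k))
          && (PySem.Str.slice p.2 none (some k) == c)) = true) := by
        intro hx
        rw [Bool.and_eq_true] at hx
        exact h hx.1
      rw [if_neg hno]

-- the k-range filter finds exactly the position len(c), exactly when col startswith c+"_"
theorem pvFiltRange (p : Int × String) (m : PySem.Dict String (List (Int × String))) (c : String) :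
    ((PySem.List.pyRange 0 (PySem.Str.len p.2) 1).filter (fun k =>
      (PySem.Str.pyGet? p.2 k == some '_')
      && m.contains (PySem.Str.slice p.2 none (some k))
      && (PySem.Str.slice p.2 none (some k) == c)))
    = if m.contains c && pvCond c p then [(c.toList.length : Int)] else [] := by
  rw [PySem.Str.len_eq, PySem.List.pyRange_zero_natCast, List.filter_map]
  by_cases hcond : (m.contains c && pvCond c p) = true
  · rw [if_pos hcond]
    obtain ⟨hmc, hsw⟩ : _ ∧ _ := by simpa using hcond
    have hpre : (c.toList ++ ['_']) <+: p.2.toList := by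
      have := (PySem.Chars.startswith_iff p.2.toList (c ++ "_").toList).mp
        (by rw [← PySem.Str.startswith_eq]; exact hsw)
      simpa [String.toList_append] using this
    have hlen : c.toList.length + 1 ≤ p.2.toList.length := by
      have := hpre.length_le
      simpa using this
    have hq : ∀ j ∈ List.range p.2.toList.length,
        ((fun k => (PySem.Str.pyGet? p.2 k == some '_')
          && m.contains (PySem.Str.slice p.2 none (some k))
          && (PySem.Str.slice p.2 none (some k) == c)) ∘ (fun k : Nat => (k : Int))) j
        = (j == c.toList.length) := by
      intro j hj
      have hjlt : j < p.2.toList.length := List.mem_range.mp hj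
      simp only [Function.comp]
      by_cases hje : j = c.toList.length
      · obtain ⟨h1, h2⟩ := (pvPrefMatch p.2 c j hjlt).mpr ⟨hje, hsw⟩
        rw [h2, h1]
        simp [hmc, hje]
      · cases hp : ((PySem.Str.pyGet? p.2 (j : Int) == some '_')
            && m.contains (PySem.Str.slice p.2 none (some (j : Int)))
            && (PySem.Str.slice p.2 none (some (j : Int)) == c)) with
        | false => symm; rw [beq_eq_false_iff_ne]; simpa using hje
        | true =>
          exfalso
          obtain ⟨⟨h1, -⟩, h3⟩ : (_ ∧ _) ∧ _ := by simpa using hp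
          exact hje ((pvPrefMatch p.2 c j hjlt).mp ⟨by simpa using h1, h3⟩).1
    rw [List.filter_congr hq, List.filter_beq, List.count_range, if_pos (by omega)]
    simp
  · rw [if_neg hcond]
    rw [List.filter_eq_nil_iff.mpr ?_, List.map_nil]
    intro j hj
    have hjlt : j < p.2.toList.length := List.mem_range.mp hj
    simp only [Function.comp]
    intro hp
    obtain ⟨⟨h1, h2⟩, h3⟩ : (_ ∧ _) ∧ _ := by simpa using hp
    obtain ⟨-, hsw⟩ := (pvPrefMatch p.2 c j hjlt).mp ⟨by simpa using h1, h3⟩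
    have hc2 : m.contains c = true := h3 ▸ h2
    exact hcond (by rw [Bool.and_eq_true]; exact ⟨hc2, hsw⟩)

-- one feature's whole k-loop, on one entry / on the key set
theorem pvGetDFeat (m : PySem.Dict String (List (Int × String))) (p : Int × String) (c : String) :
    (pvFeatStep m p).getD c []
    = m.getD c [] ++ (if m.contains c && pvCond c p then [p] else []) := by
  unfold pvFeatStep
  rw [pvGetDKfold, pvFiltRange]
  by_cases h : (m.contains c && pvCond c p) = true
  · rw [if_pos h, if_pos h]; simp
  · rw [if_neg h, if_neg h]; simp

theorem pvContainsFeat (m : PySem.Dict String (List (Int × String))) (p : Int × String)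
    (c' : String) : (pvFeatStep m p).contains c' = m.contains c' := by
  unfold pvFeatStep
  exact pvContainsKfold p _ m c'

-- the whole feature sweep, on one entry
theorem pvGetDFF (l : List (Int × String)) :
    ∀ (m : PySem.Dict String (List (Int × String))) (c : String),
    (l.foldl pvFeatStep m).getD c []
    = m.getD c [] ++ (if m.contains c then l.filter (pvCond c) else []) := by
  induction l with
  | nil => intro m c; simp
  | cons p l ih =>
    intro m c
    rw [List.foldl_cons, ih, pvGetDFeat, pvContainsFeat, List.filter_cons]
    by_cases hm : m.contains c = true
    · rw [hm]
      by_cases hcnd : pvCond c p = true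
      · simp [hcnd, List.append_assoc]
      · rw [Bool.not_eq_true] at hcnd
        simp [hcnd]
    · rw [Bool.not_eq_true] at hm
      rw [hm]
      simp

-- the `{c: [] for c in original_cat_cols}` initial dict, on the key set and on one entry
theorem pvContainsInit (ocs : List String) :
    ∀ (d : PySem.Dict String (List (Int × String))) (c : String),
    ((ocs.foldl (fun d c => d.insert c []) d).contains c) = (decide (c ∈ ocs) || d.contains c) := by
  induction ocs with
  | nil => intro d c; simp
  | cons a ocs ih =>
    intro d c
    rw [List.foldl_cons, ih, PySem.Dict.contains_insert]
    by_cases h : c = a <;> by_cases h2 : c ∈ ocs <;> simp [h, h2]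

theorem pvGetDInit (ocs : List String) :
    ∀ (d : PySem.Dict String (List (Int × String))) (c : String),
    ((ocs.foldl (fun d c => d.insert c []) d).getD c [])
    = if c ∈ ocs then [] else d.getD c [] := by
  induction ocs with
  | nil => intro d c; simp
  | cons a ocs ih =>
    intro d c
    rw [List.foldl_cons, ih, PySem.Dict.getD_insert]
    by_cases h : c ∈ ocs <;> by_cases h2 : c = a <;> simp [h, h2]

-- one cat_col step: A's rescan of the features equals B's replay of the collected matches
theorem pvCatStep_eq (fns ocs : List String) (c : String) (hc : c ∈ ocs)
    (st : PySem.Dict Int String × PySem.Dict String (List Int)) :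
    pvCatStepA fns st c = pvCatStepB ((PySem.List.enumerate fns).foldl pvFeatStep
      (ocs.foldl (fun d c => d.insert c []) PySem.Dict.empty)) st c := by
  unfold pvCatStepA pvCatStepB
  have hpairs : ((PySem.List.enumerate fns).foldl pvFeatStep
      (ocs.foldl (fun d c => d.insert c []) PySem.Dict.empty)).getD c []
      = (PySem.List.enumerate fns).filter (pvCond c) := by
    rw [pvGetDFF, pvGetDInit, pvContainsInit]
    simp [hc]
  rw [hpairs, pvPairfold]
  simp

-- ===== VERDICT (by name: the statement is the Claim_ definition above) =====
theorem create_feature_mapping_and_groups_spec : Claim_equal_create_feature_mapping_and_groups := by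
  intro fns ocs ncs _
  unfold Spec_create_feature_mapping_and_groups
  unfold create_feature_mapping_and_groups create_feature_mapping_and_groups_alt
  dsimp only
  have h0 : (PySem.List.enumerate fns).foldl (pvNumStepB (PySem.Set.ofList ncs))
      (PySem.Dict.empty, PySem.Dict.empty)
      = (PySem.List.enumerate fns).foldl (pvNumStepA ncs) (PySem.Dict.empty, PySem.Dict.empty) :=
    PySem.List.foldl_congr_mem _ _ _ _ (fun acc x _ => pvNumStep_eq ncs acc x)
  rw [h0]
  have h1 : ocs.foldl (pvCatStepA fns)
        ((PySem.List.enumerate fns).foldl (pvNumStepA ncs) (PySem.Dict.empty, PySem.Dict.empty))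
      = ocs.foldl (pvCatStepB ((PySem.List.enumerate fns).foldl pvFeatStep
          (ocs.foldl (fun d c => d.insert c []) PySem.Dict.empty)))
        ((PySem.List.enumerate fns).foldl (pvNumStepA ncs) (PySem.Dict.empty, PySem.Dict.empty)) :=
    PySem.List.foldl_congr_mem _ _ _ _ (fun acc x hx => pvCatStep_eq fns ocs x hx acc)
  rw [h1]
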